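-- pv_equiv track=rewrite | github.com/dcharb78/UFRF-MonsterMoonshinev1 | python/ufrf_monster/concurrency_sim.py | simulate_concurrency
-- ===== SOURCE A (Python) =====
-- from typing import List, Set, Tuple
-- from math import gcd
-- from functools import reduce
--
-- def lcm(a: int, b: int) -> int:
--     return a * b // gcd(a, b)
--
-- def lcm_list(lst: List[int]) -> int:
--     return reduce(lcm, lst)
--
-- def simulate_concurrency(
--     periods: List[int],
--     actives: List[Set[int]],
--     T: int = 1000
-- ) -> Tuple[int, List[bool]]:
--     """
--     Simulate concurrency for given periods and active residues.
--
--     Returns: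
--       L: lcm of periods
--       active_flags: list of booleans [Active(t)] for t in [0..T-1]
--     """
--     L = lcm_list(periods)
--     active_flags = []
--     for t in range(T):
--         is_active = any((t % p) in A for p, A in zip(periods, actives))
--         active_flags.append(is_active)
--     return L, active_flags
-- ===== SOURCE B (Python) =====
-- from math import gcd
--
-- def simulate_concurrency(periods, actives, T=1000):
--     L = periods[0]
--     for p in periods[1:]:
--         L = L * p // gcd(L, p)
--     # Each stream's activity repeats every abs(p) steps, so tabulate one cycle's
--     # pattern per stream (never beyond the timeline) and OR the tiled patterns in.
--     flags = [False] * T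
--     for p, A in zip(periods, actives):
--         m = abs(p)
--         pattern = [t % p in A for t in range(min(m, T))]
--         flags = [f or pattern[t % m] for t, f in enumerate(flags)]
--     return L, flags
-- ===== Notes on version B (the rewrite author's own statement) =====
-- stated objective: alternative
-- what changed: Instead of scanning every timestep and testing (t % p) in A for each pair, B computes each stream's one-cycle boolean pattern once (activity repeats every abs(p) steps) and ORs the tiled patterns into the timeline, so the per-timestep set-membership test becomes a memoized array index; Pre_ excludes only inputs where A raises (empty periods: TypeError from reduce; two zero periods: ZeroDivisionError in the lcm chain; a zero period zipped with a residue set when T>0: ZeroDivisionError from t % 0).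
import Mathlib
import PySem

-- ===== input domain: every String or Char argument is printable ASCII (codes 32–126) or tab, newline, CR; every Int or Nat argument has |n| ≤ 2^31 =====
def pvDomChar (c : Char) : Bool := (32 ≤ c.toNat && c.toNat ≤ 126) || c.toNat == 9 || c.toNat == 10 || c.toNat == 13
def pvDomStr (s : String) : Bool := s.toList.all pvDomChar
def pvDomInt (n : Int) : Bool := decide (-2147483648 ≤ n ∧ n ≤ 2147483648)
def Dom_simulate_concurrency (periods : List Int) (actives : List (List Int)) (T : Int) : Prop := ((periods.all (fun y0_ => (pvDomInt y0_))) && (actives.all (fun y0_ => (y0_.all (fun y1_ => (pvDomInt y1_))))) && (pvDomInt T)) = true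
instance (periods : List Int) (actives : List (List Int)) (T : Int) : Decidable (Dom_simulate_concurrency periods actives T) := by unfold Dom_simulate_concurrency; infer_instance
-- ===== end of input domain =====

-- B computes each stream's one-cycle activity pattern once and ORs the tiled patterns into the
-- timeline, replacing A's per-timestep set-membership scan by a memoized index (objective: alternative).

-- ===== PORT A =====
def pvLcm (a b : Int) : Int := PySem.Int.floordiv (a * b) (Int.gcd a b)

def pvLcmList (lst : List Int) : Int :=
  match lst with
  | [] => 0
  | h :: t => t.foldl pvLcm h

def simulate_concurrency (periods : List Int) (actives : List (List Int)) (T : Int) : Int × List Bool :=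
  let L := pvLcmList periods
  let active_flags := (PySem.List.pyRange 0 T 1).foldl
    (fun acc t => acc ++ [(periods.zip actives).any (fun pa => pa.2.contains (PySem.Int.mod t pa.1))]) []
  (L, active_flags)

-- ===== PORT B =====
def simulate_concurrency_alt (periods : List Int) (actives : List (List Int)) (T : Int) : Int × List Bool :=
  let L := match periods with
    | [] => 0
    | h :: t => t.foldl (fun acc p => PySem.Int.floordiv (acc * p) (Int.gcd acc p)) h
  let flags := (periods.zip actives).foldl
    (fun flags pa =>
      let m : Int := |pa.1|
      let pattern := (PySem.List.pyRange 0 (min m T) 1).map (fun t => pa.2.contains (PySem.Int.mod t pa.1))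
      (PySem.List.enumerate flags 0).map
        (fun tf => tf.2 || PySem.List.pyGetD pattern (PySem.Int.mod tf.1 m) false))
    (List.replicate T.toNat false)
  (L, flags)

-- ===== PRECONDITION & SPEC =====
-- Pre_ excludes only inputs on which A raises: an empty periods list (reduce raises TypeError),
-- two or more zero periods (the lcm chain raises ZeroDivisionError), and a zero period zipped
-- with a residue set while T > 0 (A raises ZeroDivisionError from t % 0 at t = 0).
def Pre_simulate_concurrency (periods : List Int) (actives : List (List Int)) (T : Int) : Prop :=
  periods ≠ [] ∧ periods.count 0 ≤ 1 ∧ ∀ pa ∈ periods.zip actives, pa.1 = 0 → T ≤ 0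
instance (periods : List Int) (actives : List (List Int)) (T : Int) : Decidable (Pre_simulate_concurrency periods actives T) := by unfold Pre_simulate_concurrency; infer_instance

def pvWitness_simulate_concurrency : List Int × List (List Int) × Int := ([2, 3], [[0], [1]], 6)

def Spec_simulate_concurrency (periods : List Int) (actives : List (List Int)) (T : Int) (out : Int × List Bool) : Prop := out = simulate_concurrency_alt periods actives T
instance (periods : List Int) (actives : List (List Int)) (T : Int) (out : Int × List Bool) : Decidable (Spec_simulate_concurrency periods actives T out) := by unfold Spec_simulate_concurrency; infer_instance

-- ===== CLAIM (what is proved, stated in full; the proofs are below) =====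
def Claim_equal_simulate_concurrency : Prop := ∀ (periods : List Int) (actives : List (List Int)) (T : Int), Dom_simulate_concurrency periods actives T → Pre_simulate_concurrency periods actives T → Spec_simulate_concurrency periods actives T (simulate_concurrency periods actives T)

-- ===== LEMMAS AND PROOFS =====

-- Python's % depends on the argument only through its residue mod |p|.
theorem pv_mod_mod (i p : Int) (hp : p ≠ 0) :
    PySem.Int.mod (PySem.Int.mod i |p|) p = PySem.Int.mod i p := by
  have hm : (0:Int) < |p| := abs_pos.mpr hp
  rcases lt_or_gt_of_ne hp with hneg | hpos
  · have habs : |p| = -p := abs_of_neg hneg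
    have key : ∀ x : Int, PySem.Int.mod x p = -((-x) % (-p)) := by
      intro x
      have h0 : PySem.Int.mod (-(-x)) (-(-p)) = - PySem.Int.mod (-x) (-p) := PySem.Int.mod_neg_neg (-x) (-p)
      simp only [neg_neg] at h0
      rw [h0, PySem.Int.mod_eq_emod_of_pos (by omega)]
    rw [key, key, PySem.Int.mod_eq_emod_of_pos hm, habs]
    have key2 : (-(i % -p)) % (-p) = (-i) % (-p) := by
      rw [Int.emod_eq_emod_iff_emod_sub_eq_zero]
      have e : -(i % -p) - -i = i - i % -p := by ring
      rw [e, Int.sub_emod, Int.emod_emod_of_dvd _ (dvd_refl _), sub_self, Int.zero_emod]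
    rw [key2]
  · have habs : |p| = p := abs_of_pos hpos
    rw [habs, PySem.Int.mod_eq_emod_of_pos hpos, PySem.Int.mod_eq_emod_of_pos hpos]
    exact Int.emod_emod_of_dvd _ (dvd_refl p)

-- One step of B's fold, read at index i.
theorem pv_step_getElem? (g : Int × Bool → Bool) (flags : List Bool) (i : Nat) :
    ((PySem.List.enumerate flags 0).map g)[i]? = flags[i]?.map (fun f => g ((i : Int), f)) := by
  rw [List.getElem?_map, PySem.List.getElem?_enumerate]
  cases flags[i]? <;> simp

-- The indexed pattern lookup equals A's membership test (p ≠ 0, time inside the pattern bound).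
theorem pv_hit (p T : Int) (A : List Int) (i : Nat) (hp : p ≠ 0) (hiT : (i : Int) < T) :
    PySem.List.pyGetD ((PySem.List.pyRange 0 (min |p| T) 1).map (fun t => A.contains (PySem.Int.mod t p)))
        (PySem.Int.mod (i : Int) |p|) false
      = A.contains (PySem.Int.mod (i : Int) p) := by
  have hm : (0:Int) < |p| := abs_pos.mpr hp
  have h0 : 0 ≤ PySem.Int.mod (i : Int) |p| := PySem.Int.mod_nonneg _ hm
  have h1 : PySem.Int.mod (i : Int) |p| < |p| := PySem.Int.mod_lt _ hm
  have hle : PySem.Int.mod (i : Int) |p| ≤ (i : Int) := by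
    rw [PySem.Int.mod_eq_emod_of_pos hm]
    rcases lt_or_ge (i : Int) |p| with h | h
    · rw [Int.emod_eq_of_lt (by omega) h]
    · have := Int.emod_lt_of_pos (i : Int) hm
      omega
  rw [PySem.List.pyGetD_map_pyRange_of_nonneg _ _ _ _ h0 (by omega), pv_mod_mod i p hp]

-- B's fold over the pairs, read at index i.
theorem pv_fold_getElem? (T : Int) :
    ∀ (l : List (Int × List Int)) (flags : List Bool) (i : Nat),
      (l.foldl (fun flags pa =>
          (PySem.List.enumerate flags 0).map
            (fun tf => tf.2 || PySem.List.pyGetD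
                ((PySem.List.pyRange 0 (min |pa.1| T) 1).map (fun t => pa.2.contains (PySem.Int.mod t pa.1)))
                (PySem.Int.mod tf.1 |pa.1|) false)) flags)[i]? =
        flags[i]?.map (fun f => f || l.any (fun pa => PySem.List.pyGetD
            ((PySem.List.pyRange 0 (min |pa.1| T) 1).map (fun t => pa.2.contains (PySem.Int.mod t pa.1)))
            (PySem.Int.mod (i : Int) |pa.1|) false)) := by
  intro l
  induction l with
  | nil => intro flags i; cases h : flags[i]? <;> simp [h]
  | cons pa l ih =>
    intro flags i
    simp only [List.foldl_cons]
    rw [ih, pv_step_getElem?]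
    cases flags[i]? <;> simp [Bool.or_assoc]

theorem pv_any_congr (f g : Int × List Int → Bool) :
    ∀ (l : List (Int × List Int)), (∀ pa ∈ l, f pa = g pa) → l.any f = l.any g := by
  intro l
  induction l with
  | nil => intro _; rfl
  | cons pa l ih =>
    intro h
    simp only [List.any_cons, h pa (List.mem_cons_self ..), ih (fun x hx => h x (List.mem_cons_of_mem _ hx))]

theorem pv_foldl_append_singleton {α β : Type} (f : α → β) :
    ∀ (l : List α) (init : List β),
      l.foldl (fun acc t => acc ++ [f t]) init = init ++ l.map f := by
  intro l
  induction l with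
  | nil => intro init; simp
  | cons h t ih => intro init; simp [ih]

theorem pv_ports_agree (periods : List Int) (actives : List (List Int)) (T : Int)
    (hz : ∀ pa ∈ periods.zip actives, pa.1 = 0 → T ≤ 0) :
    simulate_concurrency periods actives T = simulate_concurrency_alt periods actives T := by
  unfold simulate_concurrency simulate_concurrency_alt
  refine Prod.ext ?_ ?_
  · cases periods <;> rfl
  · simp only []
    rw [pv_foldl_append_singleton, List.nil_append]
    apply List.ext_getElem?
    intro i
    rw [List.getElem?_map, PySem.List.getElem?_pyRange_one, pv_fold_getElem? T,
        List.getElem?_replicate]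
    by_cases hi : i < (T - 0).toNat
    · have hT : 0 < T := by omega
      have hiT : i < T.toNat := by omega
      rw [if_pos hi, if_pos hiT]
      simp only [Option.map_some, Bool.false_or, Option.some.injEq, zero_add]
      refine (pv_any_congr _ _ _ ?_).symm
      intro pa hpa
      have hp : pa.1 ≠ 0 := fun h => absurd (hz pa hpa h) (by omega)
      exact pv_hit pa.1 T pa.2 i hp (by omega)
    · have hiT : ¬ i < T.toNat := by omega
      rw [if_neg hi, if_neg hiT]
      rfl

-- ===== VERDICT (by name: the statement is the Claim_ definition above) =====
theorem simulate_concurrency_spec : Claim_equal_simulate_concurrency := by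
  intro periods actives T _ hpre
  unfold Spec_simulate_concurrency
  exact pv_ports_agree periods actives T hpre.2.2
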